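-- pv_equiv track=rewrite | github.com/ShivaGovindaraju/COEN379_AdvDAA | HW3/hw3_p3.py | confirm_perfect_hash
-- ===== SOURCE A (Python) =====
-- def h_x(N, P, a, b, x):
--     return (((a * x) + b) % P) % (N * N) # the hash-function described in the problem text.
--
-- def confirm_perfect_hash(N, P, S, a, b):
--     table = [False] * (N * N) # vector containing flags to detect collisions in a hash-table.
--     for x in S:
--         key_hash = h_x(N, P, a, b, x) #first find the hash for a given key x
--         if table[key_hash]: # if another value has already been assigned that key, a collision occured
--             return False
--         table[key_hash] = True # flag the key as in-use by key x
--     return True # if no collisions were detected, it's a perfect hash function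
-- ===== SOURCE B (Python) =====
-- def confirm_perfect_hash(N, P, S, a, b):
--     vals = sorted((((a * x) + b) % P) % (N * N) for x in S)
--     for u, v in zip(vals, vals[1:]):
--         if u == v:
--             return False
--     return True
-- ===== Notes on version B (the rewrite author's own statement) =====
-- stated objective: alternative
-- what changed: Replaced the incremental N*N flag-table insert-and-check loop with a build-all-then-scan decomposition: compute every hash value, sort them, and scan adjacent pairs for a duplicate.
-- outside the precondition, e.g. on confirm_perfect_hash(0, 7, [1], 3, 1): A raises ZeroDivisionError, B raises ZeroDivisionError; on confirm_perfect_hash(2, 0, [1], 3, 1): A raises ZeroDivisionError, B raises ZeroDivisionError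
import Mathlib
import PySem

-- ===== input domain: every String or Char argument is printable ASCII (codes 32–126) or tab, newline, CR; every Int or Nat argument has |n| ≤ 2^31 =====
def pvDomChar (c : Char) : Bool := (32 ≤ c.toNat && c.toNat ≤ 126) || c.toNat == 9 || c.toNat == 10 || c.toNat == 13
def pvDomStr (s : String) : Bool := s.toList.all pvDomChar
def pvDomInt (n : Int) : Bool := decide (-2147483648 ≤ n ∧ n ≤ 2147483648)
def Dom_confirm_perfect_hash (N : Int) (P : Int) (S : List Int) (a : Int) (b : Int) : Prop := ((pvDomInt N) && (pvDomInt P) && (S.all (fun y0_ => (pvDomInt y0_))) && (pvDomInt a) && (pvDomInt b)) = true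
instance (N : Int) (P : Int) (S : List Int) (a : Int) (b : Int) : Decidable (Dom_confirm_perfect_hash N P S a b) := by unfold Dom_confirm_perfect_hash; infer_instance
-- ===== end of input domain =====

-- B replaces A's incremental N*N flag-table loop by computing all hash values, sorting them
-- and scanning adjacent pairs for a duplicate (objective: alternative algorithm).


-- ===== PORT A =====
-- h_x(N, P, a, b, x) = (((a * x) + b) % P) % (N * N), Python % via PySem.Int.mod
def pvHash (N P a b x : Int) : Int :=
  PySem.Int.mod (PySem.Int.mod (a * x + b) P) (N * N)

-- the 'for x in S' loop over the flag table, with early return False on a collision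
def pvScanA (N P a b : Int) : List Int → List Bool → Bool
  | [], _ => true
  | x :: rest, table =>
    let key_hash := pvHash N P a b x
    match PySem.List.pyGet? table key_hash with      -- table[key_hash]; none = IndexError (outside Pre_)
    | none => false
    | some flag =>
      if flag then false
      else pvScanA N P a b rest (PySem.List.pySetD table key_hash true)  -- table[key_hash] = True

def confirm_perfect_hash (N : Int) (P : Int) (S : List Int) (a : Int) (b : Int) : Bool :=
  pvScanA N P a b S (List.replicate (N * N).toNat false)   -- table = [False] * (N * N)

-- ===== PORT B =====
-- 'for u, v in zip(vals, vals[1:]): if u == v: return False' / 'return True'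
def pvAdjScan : List (Int × Int) → Bool
  | [] => true
  | (u, v) :: rest => if u = v then false else pvAdjScan rest

def confirm_perfect_hash_alt (N : Int) (P : Int) (S : List Int) (a : Int) (b : Int) : Bool :=
  let vals := PySem.List.sorted (S.map (fun x => pvHash N P a b x)) (fun v => v) false
  pvAdjScan (vals.zip (PySem.List.slice vals (some 1) none))

-- ===== PRECONDITION & SPEC =====
-- Pre_ excludes exactly the inputs on which A raises ZeroDivisionError (S nonempty with P = 0 or N = 0);
-- B raises the same exception there.
def Pre_confirm_perfect_hash (N : Int) (P : Int) (S : List Int) (a : Int) (b : Int) : Prop :=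
  S = [] ∨ (P ≠ 0 ∧ N ≠ 0)
instance (N : Int) (P : Int) (S : List Int) (a : Int) (b : Int) : Decidable (Pre_confirm_perfect_hash N P S a b) := by unfold Pre_confirm_perfect_hash; infer_instance
def pvWitness_confirm_perfect_hash : Int × Int × List Int × Int × Int := (2, 7, [1, 2], 3, 1)

def Spec_confirm_perfect_hash (N : Int) (P : Int) (S : List Int) (a : Int) (b : Int) (out : Bool) : Prop := out = confirm_perfect_hash_alt N P S a b
instance (N : Int) (P : Int) (S : List Int) (a : Int) (b : Int) (out : Bool) : Decidable (Spec_confirm_perfect_hash N P S a b out) := by unfold Spec_confirm_perfect_hash; infer_instance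

-- ===== CLAIM (what is proved, stated in full; the proofs are below) =====
def Claim_equal_confirm_perfect_hash : Prop := ∀ (N : Int) (P : Int) (S : List Int) (a : Int) (b : Int), Dom_confirm_perfect_hash N P S a b → Pre_confirm_perfect_hash N P S a b → Spec_confirm_perfect_hash N P S a b (confirm_perfect_hash N P S a b)

-- ===== LEMMAS AND PROOFS =====

lemma pvHash_nonneg (N P a b x : Int) (hNN : 0 < N * N) : 0 ≤ pvHash N P a b x :=
  PySem.Int.mod_nonneg _ hNN

lemma pvHash_lt (N P a b x : Int) (hNN : 0 < N * N) : pvHash N P a b x < N * N :=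
  PySem.Int.mod_lt _ hNN

-- invariant for A's loop
lemma pvScanA_true_iff (N P a b : Int) (hNN : 0 < N * N) :
    ∀ (rest : List Int) (table : List Bool), table.length = (N * N).toNat →
    (pvScanA N P a b rest table = true ↔
      ((rest.map (fun x => pvHash N P a b x)).Nodup ∧
       ∀ x ∈ rest, table.getD (pvHash N P a b x).toNat false = false)) := by
  intro rest
  induction rest with
  | nil => intro table hlen; simp [pvScanA]
  | cons x rest ih =>
    intro table hlen
    have hx0 : 0 ≤ pvHash N P a b x := pvHash_nonneg N P a b x hNN
    have hxlt : (pvHash N P a b x).toNat < table.length := by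
      have := pvHash_lt N P a b x hNN; omega
    have hget : PySem.List.pyGet? table (pvHash N P a b x) = some table[(pvHash N P a b x).toNat] :=
      PySem.List.pyGet?_eq_some_getElem table hx0 (by omega)
    have hset : PySem.List.pySetD table (pvHash N P a b x) true
        = table.set (pvHash N P a b x).toNat true :=
      PySem.List.pySetD_of_nonneg table true hx0
    rw [pvScanA]
    simp only [hget]
    by_cases hflag : table[(pvHash N P a b x).toNat] = true
    · simp only [hflag]
      constructor
      · intro h; cases h
      · rintro ⟨-, hall⟩
        have := hall x (by simp)
        rw [List.getD_eq_getElem table false hxlt] at this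
        rw [hflag] at this; cases this
    · have hflag' : table[(pvHash N P a b x).toNat] = false := by
        cases h : table[(pvHash N P a b x).toNat] with
        | false => rfl
        | true => exact absurd h hflag
      rw [hflag', hset, if_neg (by simp), ih (table.set (pvHash N P a b x).toNat true) (by simpa using hlen)]
      constructor
      · rintro ⟨hnd, hall⟩
        refine ⟨?_, ?_⟩
        · rw [List.map_cons, List.nodup_cons]
          refine ⟨?_, hnd⟩
          intro hmem
          rcases List.mem_map.mp hmem with ⟨y, hy, hyx⟩
          have := hall y hy
          have hy0 : 0 ≤ pvHash N P a b y := pvHash_nonneg N P a b y hNN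
          have hylt : (pvHash N P a b y).toNat < table.length := by
            have := pvHash_lt N P a b y hNN; omega
          have heq : (pvHash N P a b y).toNat = (pvHash N P a b x).toNat := by omega
          rw [List.getD_eq_getElem _ false (by simpa using hylt),
              List.getElem_set, if_pos heq.symm] at this
          cases this
        · intro y hy
          rcases List.mem_cons.mp hy with rfl | hy'
          · rw [List.getD_eq_getElem table false hxlt]; exact hflag'
          · have := hall y hy'
            have hylt : (pvHash N P a b y).toNat < table.length := by
              have := pvHash_lt N P a b y hNN
              have := pvHash_nonneg N P a b y hNN
              omega
            rw [List.getD_eq_getElem _ false (by simpa using hylt),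
                List.getElem_set] at this
            rw [List.getD_eq_getElem _ false hylt]
            by_cases hne : (pvHash N P a b x).toNat = (pvHash N P a b y).toNat
            · rw [if_pos hne] at this; cases this
            · rwa [if_neg hne] at this
      · rintro ⟨hnd, hall⟩
        rw [List.map_cons, List.nodup_cons] at hnd
        refine ⟨hnd.2, ?_⟩
        intro y hy
        have hy0 : 0 ≤ pvHash N P a b y := pvHash_nonneg N P a b y hNN
        have hylt : (pvHash N P a b y).toNat < table.length := by
          have := pvHash_lt N P a b y hNN; omega
        rw [List.getD_eq_getElem _ false (by simpa using hylt), List.getElem_set]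
        have hyne : pvHash N P a b y ≠ pvHash N P a b x := by
          intro h
          exact hnd.1 (List.mem_map.mpr ⟨y, hy, h⟩)
        rw [if_neg (by omega)]
        have := hall y (List.mem_cons_of_mem _ hy)
        rwa [List.getD_eq_getElem _ false hylt] at this

lemma replicate_getD_false (n i : Nat) : (List.replicate n false).getD i false = false := by
  rcases lt_or_ge i n with h | h
  · rw [List.getD_eq_getElem _ false (by simpa using h)]; simp
  · rw [List.getD_eq_default _ false (by simpa using h)]

-- A = true iff the hash values of S are pairwise distinct (S nonempty case uses 0 < N*N)
lemma confirm_A_true_iff (N P a b : Int) (S : List Int) (hNN : 0 < N * N) :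
    (confirm_perfect_hash N P S a b = true ↔ (S.map (fun x => pvHash N P a b x)).Nodup) := by
  rw [confirm_perfect_hash,
      pvScanA_true_iff N P a b hNN S _ (by simp)]
  constructor
  · exact fun h => h.1
  · intro h
    exact ⟨h, fun x _ => replicate_getD_false _ _⟩

-- B's adjacent scan on (v, tail v) accepts iff no two adjacent elements are equal
lemma pvAdjScan_zip_tail (v : List Int) :
    pvAdjScan (v.zip v.tail) = true ↔ List.IsChain (· ≠ ·) v := by
  induction v with
  | nil => simp [pvAdjScan]
  | cons u t ih =>
    cases t with
    | nil => simp [pvAdjScan]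
    | cons w t' =>
      rw [List.tail_cons, List.zip_cons_cons, pvAdjScan, List.isChain_cons_cons]
      rw [List.tail_cons] at ih
      by_cases h : u = w
      · simp [h]
      · rw [if_neg h, ih]
        tauto

lemma isChain_lt_of_le_ne (v : List Int) (h1 : List.IsChain (· ≤ ·) v)
    (h2 : List.IsChain (· ≠ ·) v) : List.IsChain (· < ·) v := by
  induction v with
  | nil => exact List.isChain_nil
  | cons u t ih =>
    cases t with
    | nil => exact List.isChain_singleton u
    | cons w t' =>
      rw [List.isChain_cons_cons] at h1 h2 ⊢
      exact ⟨lt_of_le_of_ne h1.1 h2.1, ih h1.2 h2.2⟩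

-- on a ≤-sorted list, "no equal adjacent pair" is exactly Nodup
lemma isChain_ne_iff_nodup (v : List Int) (hs : v.Pairwise (· ≤ ·)) :
    List.IsChain (· ≠ ·) v ↔ v.Nodup := by
  constructor
  · intro h
    have hlt : List.IsChain (· < ·) v := isChain_lt_of_le_ne v (List.isChain_iff_pairwise.mpr hs) h
    have : v.Pairwise (· < ·) := List.isChain_iff_pairwise.mp hlt
    exact this.imp (fun h => ne_of_lt h)
  · intro h
    have : v.Pairwise (· < ·) := by
      refine (hs.and h).imp ?_
      rintro a b ⟨hle, hne⟩
      exact lt_of_le_of_ne hle hne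
    exact (List.isChain_iff_pairwise.mpr this).imp (fun _ _ h => ne_of_lt h)

-- B = true iff the hash values of S are pairwise distinct
lemma confirm_B_true_iff (N P a b : Int) (S : List Int) :
    (confirm_perfect_hash_alt N P S a b = true ↔ (S.map (fun x => pvHash N P a b x)).Nodup) := by
  rw [confirm_perfect_hash_alt]
  simp only [PySem.List.slice_from_one]
  rw [pvAdjScan_zip_tail,
      isChain_ne_iff_nodup _ (PySem.List.sorted_pairwise _ _),
      List.Perm.nodup_iff (PySem.List.sorted_perm _ _ _)]

-- ===== VERDICT (by name: the statement is the Claim_ definition above) =====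
theorem confirm_perfect_hash_spec : Claim_equal_confirm_perfect_hash := by
  intro N P S a b _ hpre
  unfold Spec_confirm_perfect_hash
  rcases hpre with rfl | ⟨hP, hN⟩
  · rfl
  · have hNN : 0 < N * N := mul_self_pos.mpr hN
    have := (confirm_A_true_iff N P a b S hNN).trans (confirm_B_true_iff N P a b S).symm
    cases hA : confirm_perfect_hash N P S a b with
    | true => exact (this.mp hA).symm
    | false =>
      cases hB : confirm_perfect_hash_alt N P S a b with
      | true => rw [hA] at this; exact absurd (this.mpr hB) (by simp)
      | false => rfl
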